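-- pv_equiv track=rewrite | github.com/SebIn020208/backjoon_programmers_study | 프로그래머스/2/138476. 귤 고르기/귤 고르기.py | solution
-- ===== SOURCE A (Python) =====
-- def solution(k, tangerine):
--     arr = sorted(tangerine)
--
--     sum_arr = []
--     count = 1
--     for i in range(1, len(arr)):
--         if arr[i] == arr[i-1]:
--             count += 1
--         else:
--             sum_arr.append(count)
--             count = 1
--     sum_arr.append(count)  # 마지막 그룹 추가
--
--     sum_arr.sort(reverse=True)
--
--     result = 0
--     total = 0
--     for num in sum_arr:
--         total += num
--         result += 1
--         if total >= k:
--             return result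
-- ===== SOURCE B (Python) =====
-- def solution(k, tangerine):
--     counts = {}
--     for t in tangerine:
--         counts[t] = counts.get(t, 0) + 1
--     result = 0
--     total = 0
--     for num in sorted(counts.values(), reverse=True):
--         total += num
--         result += 1
--         if total >= k:
--             return result
-- ===== Notes on version B (the rewrite author's own statement) =====
-- stated objective: idiomatic
-- what changed: Grouping by sorting the whole list and scanning adjacent equal elements is replaced by a dict frequency counter whose values are sorted descending; only the group sizes are sorted, the data itself never is.
-- outside the precondition, e.g. on solution(1, []): A returns 1, B returns None; on solution(5, [1, 1]): A returns None, B returns None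
import Mathlib
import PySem

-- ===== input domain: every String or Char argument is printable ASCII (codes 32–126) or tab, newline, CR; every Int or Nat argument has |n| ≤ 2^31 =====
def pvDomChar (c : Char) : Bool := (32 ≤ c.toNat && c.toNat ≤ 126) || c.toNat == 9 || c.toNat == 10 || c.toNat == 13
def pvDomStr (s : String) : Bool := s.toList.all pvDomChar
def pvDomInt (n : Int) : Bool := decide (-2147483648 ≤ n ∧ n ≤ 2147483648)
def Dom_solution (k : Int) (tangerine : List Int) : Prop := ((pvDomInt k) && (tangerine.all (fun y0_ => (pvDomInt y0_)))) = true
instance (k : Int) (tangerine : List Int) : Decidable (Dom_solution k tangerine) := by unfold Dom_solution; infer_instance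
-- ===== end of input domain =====

-- B replaces A's sort-then-adjacent-scan grouping with a dict frequency counter; the final greedy
-- loop over the descending group sizes is textually identical in both Pythons, so both ports share
-- its transcription pvGreedy. Objective: idiomatic (grouping via a hash map, no full sort of the data).

-- ===== PORT A =====
-- the trailing 'for num in sum_arr: total += num; result += 1; if total >= k: return result'
-- loop, identical in A and B (none = the loop falls through, Python returns None)
def pvGreedy (k : Int) : List Int → Int → Int → Option Int
  | [], _, _ => none
  | num :: rest, total, result =>
    if total + num ≥ k then some (result + 1) else pvGreedy k rest (total + num) (result + 1)

def solution (k : Int) (tangerine : List Int) : Int :=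
  let arr := PySem.List.sorted tangerine (fun x => x) false
  let st := (PySem.List.pyRange 1 (PySem.List.len arr) 1).foldl
      (fun (st : List Int × Int) i =>
        if PySem.List.pyGetD arr i 0 = PySem.List.pyGetD arr (i - 1) 0
        then (st.1, st.2 + 1)
        else (st.1 ++ [st.2], 1)) ([], 1)
  let sumArr := st.1 ++ [st.2]
  (pvGreedy k (PySem.List.sorted sumArr (fun x => x) true) 0 0).getD 0

-- ===== PORT B =====
def solution_alt (k : Int) (tangerine : List Int) : Int :=
  let counts := tangerine.foldl
      (fun (d : PySem.Dict Int Int) t => d.insert t (d.getD t 0 + 1)) PySem.Dict.empty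
  (pvGreedy k (PySem.List.sorted counts.values (fun x => x) true) 0 0).getD 0

-- ===== PRECONDITION & SPEC =====
-- Pre_ excludes k > len(tangerine), where Python A falls through the loop and returns None (not an
-- int), and the empty list, where A's unconditional trailing append counts a phantom group (A
-- returns 1 for k ≤ 1 although there are no tangerines) while B's counter yields no groups and
-- returns None.
def Pre_solution (k : Int) (tangerine : List Int) : Prop :=
  tangerine ≠ [] ∧ k ≤ (tangerine.length : Int)
instance (k : Int) (tangerine : List Int) : Decidable (Pre_solution k tangerine) := by
  unfold Pre_solution; infer_instance
def pvWitness_solution : Int × List Int := (2, [1, 2, 2, 3])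

def Spec_solution (k : Int) (tangerine : List Int) (out : Int) : Prop := out = solution_alt k tangerine
instance (k : Int) (tangerine : List Int) (out : Int) : Decidable (Spec_solution k tangerine out) := by unfold Spec_solution; infer_instance

-- ===== CLAIM (what is proved, stated in full; the proofs are below) =====
def Claim_equal_solution : Prop := ∀ (k : Int) (tangerine : List Int), Dom_solution k tangerine → Pre_solution k tangerine → Spec_solution k tangerine (solution k tangerine)

-- ===== LEMMAS AND PROOFS =====

-- run lengths of the current scan: pvRuns x c t = run lengths of x :: t, given that the run
-- ending at x already has length c
def pvRuns : Int → Int → List Int → List Int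
  | _, c, [] => [c]
  | x, c, y :: t => if y = x then pvRuns y (c + 1) t else c :: pvRuns y 1 t

-- A's index loop reads the list of adjacent pairs
lemma pv_range_pairs (arr : List Int) :
    (PySem.List.pyRange 1 (PySem.List.len arr) 1).map
      (fun i => (PySem.List.pyGetD arr (i - 1) 0, PySem.List.pyGetD arr i 0)) =
    arr.zip arr.tail := by
  have hlen : (PySem.List.pyRange 1 (PySem.List.len arr) 1).length = arr.length - 1 := by
    simp [PySem.List.length_pyRange_one, PySem.List.len]
  apply List.ext_getElem
  · simp
  · intro j h1 h2
    have hj : j < arr.length - 1 := by rwa [List.length_map, hlen] at h1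
    have hr : (PySem.List.pyRange 1 (PySem.List.len arr) 1)[j]'(by rwa [hlen]) = 1 + (j : Int) := by
      rw [PySem.List.getElem_pyRange_one]
    simp only [List.getElem_map, hr]
    have e1 : PySem.List.pyGetD arr (1 + (j:Int) - 1) 0 = arr[j]'(by omega) := by
      rw [show (1 + (j:Int) - 1) = (j:Int) by ring,
          PySem.List.pyGetD_eq_getElem arr 0 (by positivity) (by exact_mod_cast (by omega : j < arr.length))]
      simp
    have e2 : PySem.List.pyGetD arr (1 + (j:Int)) 0 = arr[j+1]'(by omega) := by
      rw [show (1 + (j:Int)) = ((j+1 : Nat) : Int) by push_cast; ring,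
          PySem.List.pyGetD_eq_getElem arr 0 (by positivity) (by exact_mod_cast (by omega : j+1 < arr.length))]
      simp
    rw [e1, e2, List.getElem_zip]
    congr 1
    rw [List.getElem_tail]

lemma pv_sorted_rev_of_perm {l1 l2 : List Int} (h : l1.Perm l2) :
    PySem.List.sorted l1 (fun x => x) true = PySem.List.sorted l2 (fun x => x) true := by
  apply PySem.List.eq_of_perm_of_pairwise_le_of_injective (fun v : Int => -v) neg_injective
  · exact ((PySem.List.sorted_perm l1 _ true).trans h).trans (PySem.List.sorted_perm l2 _ true).symm
  · exact (PySem.List.sorted_pairwise_rev l1 _).imp (fun hab => by simpa using hab)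
  · exact (PySem.List.sorted_pairwise_rev l2 _).imp (fun hab => by simpa using hab)

lemma pv_counter_values (xs : List Int) :
    (xs.foldl (fun (d : PySem.Dict Int Int) t => d.insert t (d.getD t 0 + 1)) PySem.Dict.empty).values =
    (PySem.Set.ofList xs).map (fun v => ((xs.count v : Nat) : Int)) := by
  rw [PySem.Dict.foldl_insert_getD_add_one_eq_counter,
      PySem.Dict.values_eq_map_keys _ (PySem.Dict.nodup_keys_counter xs) 0,
      PySem.Dict.keys_counter]
  exact List.map_congr_left (fun v _ => PySem.Dict.getD_counter xs v)

lemma pv_zip_foldl_runs (t : List Int) : ∀ (x : Int) (acc : List Int) (c : Int),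
    (let st := ((x :: t).zip t).foldl
        (fun (st : List Int × Int) (p : Int × Int) =>
          if p.2 = p.1 then (st.1, st.2 + 1) else (st.1 ++ [st.2], 1)) (acc, c)
     st.1 ++ [st.2]) = acc ++ pvRuns x c t := by
  induction t with
  | nil => intro x acc c; simp [pvRuns]
  | cons y t ih =>
    intro x acc c
    by_cases hyx : y = x
    · simp only [List.zip_cons_cons, List.foldl_cons, hyx, pvRuns]
      exact ih x acc (c + 1)  -- hmm need x vs y
    · simp only [List.zip_cons_cons, List.foldl_cons, pvRuns, if_neg hyx]
      rw [ih y (acc ++ [c]) 1, List.append_assoc]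
      simp

lemma pv_discard_dedup (l : List Int) (y : Int) (h : ∀ z ∈ l, y ≤ z) :
    PySem.Set.discard (PySem.List.dedup l) y =
    PySem.List.dedup (l.filter (fun z => decide (y < z))) := by
  induction l with
  | nil => simp [PySem.List.dedup_eq_ofList, PySem.Set.discard, PySem.Set.ofList_nil]
  | cons z l ih =>
    have hyz : y ≤ z := h z (by simp)
    have ih' := ih (fun w hw => h w (by simp [hw]))
    simp only [PySem.List.dedup_eq_ofList] at ih' ⊢
    by_cases hzy : z = y
    · subst hzy
      rw [List.filter_cons_of_neg (by simp)]
      rw [PySem.Set.ofList_cons]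
      simp only [PySem.Set.discard, List.filter_cons]
      rw [if_neg (by simp)]
      rw [← ih']
      simp [PySem.Set.discard, List.filter_filter]
    · have hlt : y < z := lt_of_le_of_ne hyz (Ne.symm hzy)
      rw [List.filter_cons_of_pos (by simpa using hlt)]
      rw [PySem.Set.ofList_cons, PySem.Set.ofList_cons]
      simp only [PySem.Set.discard, List.filter_cons]
      rw [if_pos (by simpa using hzy)]
      rw [← ih']
      simp [PySem.Set.discard, List.filter_filter]
      congr 1
      funext a
      exact Bool.and_comm _ _

lemma pv_runs_dedup_of (t : List Int) (y : Int) (hp : (y :: t).Pairwise (· ≤ ·))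
    (hrec : pvRuns y 1 t = (1 + (t.count y : Int)) ::
      (PySem.List.dedup (t.filter (fun z => decide (y < z)))).map (fun v => (t.count v : Int))) :
    pvRuns y 1 t = (PySem.List.dedup (y :: t)).map (fun v => (((y :: t).count v : Nat) : Int)) := by
  rw [hrec]
  have hge : ∀ z ∈ t, y ≤ z := by
    intro z hz; exact (List.pairwise_cons.mp hp).1 z hz
  simp only [PySem.List.dedup_eq_ofList]
  rw [PySem.Set.ofList_cons, List.map_cons]
  rw [show (PySem.Set.ofList t).discard y = PySem.Set.ofList (t.filter (fun z => decide (y < z))) by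
        have := pv_discard_dedup t y hge
        simpa [PySem.List.dedup_eq_ofList] using this]
  congr 1
  · simp; ring
  · apply List.map_congr_left
    intro v hv
    have hvy : y < v := by
      have := (PySem.List.mem_dedup _ _).mp hv
      simpa using (List.mem_filter.mp this).2
    simp [List.count_cons]
    omega

lemma pv_runs_sorted (t : List Int) : ∀ (x c : Int), (x :: t).Pairwise (· ≤ ·) →
    pvRuns x c t = (c + (t.count x : Int)) ::
      (PySem.List.dedup (t.filter (fun z => decide (x < z)))).map (fun v => (t.count v : Int)) := by
  induction t with
  | nil => intro x c _; simp [pvRuns, PySem.List.dedup_eq_ofList, PySem.Set.ofList_nil]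
  | cons y t ih =>
    intro x c hp
    have hxy : x ≤ y := (List.pairwise_cons.mp hp).1 y (by simp)
    have hp' : (y :: t).Pairwise (· ≤ ·) := (List.pairwise_cons.mp hp).2
    have hyt : ∀ z ∈ t, y ≤ z := fun z hz => (List.pairwise_cons.mp hp').1 z hz
    by_cases hyx : y = x
    · subst hyx
      rw [pvRuns, if_pos rfl]
      rw [ih y (c + 1) hp']
      rw [List.filter_cons_of_neg (by simp)]
      congr 1
      · simp; ring
      · apply List.map_congr_left
        intro v hv
        have hvy : y < v := by
          have := (PySem.List.mem_dedup _ _).mp hv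
          simpa using (List.mem_filter.mp this).2
        simp [List.count_cons]
        omega
    · have hlt : x < y := lt_of_le_of_ne hxy (Ne.symm hyx)
      rw [pvRuns, if_neg hyx]
      have hnotmem : (y :: t).count x = 0 := by
        rw [List.count_eq_zero]
        intro hmem
        rcases List.mem_cons.mp hmem with h | h
        · omega
        · have := hyt x h; omega
      have hfilt : (y :: t).filter (fun z => decide (x < z)) = y :: t := by
        apply List.filter_eq_self.mpr
        intro a ha
        rcases List.mem_cons.mp ha with h | h
        · subst h; simpa using hlt
        · have := hyt a h; simp; omega
      rw [hnotmem, hfilt]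
      simp only [Nat.cast_zero, add_zero]
      congr 1
      exact pv_runs_dedup_of t y hp' (ih y 1 hp')

lemma pv_runs_dedup (t : List Int) (x : Int) (hp : (x :: t).Pairwise (· ≤ ·)) :
    pvRuns x 1 t = (PySem.List.dedup (x :: t)).map (fun v => (((x :: t).count v : Nat) : Int)) :=
  pv_runs_dedup_of t x hp (pv_runs_sorted t x 1 hp)

-- A's whole grouping phase, on a nonempty sorted list
lemma pv_groups (arr : List Int) (hne : arr ≠ []) (hp : arr.Pairwise (· ≤ ·)) :
    ((PySem.List.pyRange 1 (PySem.List.len arr) 1).foldl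
        (fun (st : List Int × Int) i =>
          if PySem.List.pyGetD arr i 0 = PySem.List.pyGetD arr (i - 1) 0
          then (st.1, st.2 + 1) else (st.1 ++ [st.2], 1)) ([], 1)).1 ++
      [((PySem.List.pyRange 1 (PySem.List.len arr) 1).foldl
        (fun (st : List Int × Int) i =>
          if PySem.List.pyGetD arr i 0 = PySem.List.pyGetD arr (i - 1) 0
          then (st.1, st.2 + 1) else (st.1 ++ [st.2], 1)) ([], 1)).2] =
    (PySem.List.dedup arr).map (fun v => ((arr.count v : Nat) : Int)) := by
  obtain ⟨x, t, hxt⟩ := List.exists_cons_of_ne_nil hne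
  have hf : (PySem.List.pyRange 1 (PySem.List.len arr) 1).foldl
        (fun (st : List Int × Int) i =>
          if PySem.List.pyGetD arr i 0 = PySem.List.pyGetD arr (i - 1) 0
          then (st.1, st.2 + 1) else (st.1 ++ [st.2], 1)) ([], 1) =
      (arr.zip arr.tail).foldl
        (fun (st : List Int × Int) (p : Int × Int) =>
          if p.2 = p.1 then (st.1, st.2 + 1) else (st.1 ++ [st.2], 1)) ([], 1) := by
    rw [← pv_range_pairs arr, List.foldl_map]
  rw [hf, hxt]
  have hz := pv_zip_foldl_runs t x [] 1
  simp only [List.tail_cons] at hz ⊢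
  rw [hz, List.nil_append]
  exact pv_runs_dedup t x (hxt ▸ hp)

-- ===== VERDICT (by name: the statement is the Claim_ definition above) =====
theorem solution_spec : Claim_equal_solution := by
  intro k xs _ hpre
  obtain ⟨hne, -⟩ := hpre
  unfold Spec_solution solution solution_alt
  simp only []
  have harrne : PySem.List.sorted xs (fun x => x) false ≠ [] := by
    intro h; exact hne ((PySem.List.sorted_eq_nil_iff xs _ false).mp h)
  have hpair : (PySem.List.sorted xs (fun x => x) false).Pairwise (· ≤ ·) := by
    simpa using PySem.List.sorted_pairwise xs (fun x => x)
  rw [pv_groups _ harrne hpair, pv_counter_values xs]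
  have hperm : (PySem.List.sorted xs (fun x => x) false).Perm xs := PySem.List.sorted_perm xs _ false
  have hmapcount : (PySem.List.dedup (PySem.List.sorted xs (fun x => x) false)).map
        (fun v => (((PySem.List.sorted xs (fun x => x) false).count v : Nat) : Int)) =
      (PySem.List.dedup (PySem.List.sorted xs (fun x => x) false)).map
        (fun v => ((xs.count v : Nat) : Int)) := by
    apply List.map_congr_left
    intro v _
    rw [hperm.count_eq v]
  rw [hmapcount]
  have hsetperm : (PySem.List.dedup (PySem.List.sorted xs (fun x => x) false)).Perm (PySem.Set.ofList xs) := by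
    simp only [PySem.List.dedup_eq_ofList]
    apply (List.perm_ext_iff_of_nodup (PySem.Set.nodup_ofList _) (PySem.Set.nodup_ofList _)).mpr
    intro a
    simp only [PySem.Set.mem_ofList]
    exact hperm.mem_iff
  rw [pv_sorted_rev_of_perm (hsetperm.map _)]
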